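-- pv_equiv track=rewrite | github.com/OthmanMohammad/multi-agent-support-system | src/agents/revenue/sales/deal_progression/closer.py | _identify_closing_signals
-- ===== SOURCE A (Python) =====
-- def _identify_closing_signals(message: str, deal_details: dict) -> dict[str, list[str]]:
--     """Identify buying signals in communication"""
--     signals = {"strong": [], "moderate": [], "weak": []}
--
--     message_lower = message.lower()
--
--     # Check for strong signals
--     if any(
--         sig in message_lower
--         for sig in ["implementation", "start date", "contract", "procurement"]
--     ):
--         signals["strong"].append("asking_about_implementation")
--     if "reference" in message_lower:
--         signals["strong"].append("requested_references")
--
--     # Check for moderate signals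
--     if "pricing" in message_lower or "cost" in message_lower:
--         signals["moderate"].append("detailed_pricing_questions")
--     if "support" in message_lower or "training" in message_lower:
--         signals["moderate"].append("asking_about_support")
--
--     # From deal details
--     if deal_details.get("trial_active", False):
--         signals["moderate"].append("active_trial_usage")
--
--     return signals
-- ===== SOURCE B (Python) =====
-- def _identify_closing_signals(message: str, deal_details: dict) -> dict[str, list[str]]:
--     """Identify buying signals: one left-to-right scan of the message collects every
--     matched keyword (a tiny multi-pattern matcher), then the hit set is mapped to signals."""
--     keywords = ("implementation", "start date", "contract", "procurement",
--                 "reference", "pricing", "cost", "support", "training")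
--     m = message.lower()
--     hits = set()
--     for i in range(len(m)):
--         for kw in keywords:
--             if m.startswith(kw, i):
--                 hits.add(kw)
--     strong = []
--     if any(kw in hits for kw in ("implementation", "start date", "contract", "procurement")):
--         strong.append("asking_about_implementation")
--     if "reference" in hits:
--         strong.append("requested_references")
--     moderate = []
--     if any(kw in hits for kw in ("pricing", "cost")):
--         moderate.append("detailed_pricing_questions")
--     if any(kw in hits for kw in ("support", "training")):
--         moderate.append("asking_about_support")
--     if deal_details.get("trial_active", False):
--         moderate.append("active_trial_usage")
--     return {"strong": strong, "moderate": moderate, "weak": []}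
-- ===== Notes on version B (the rewrite author's own statement) =====
-- stated objective: alternative
-- what changed: Instead of nine independent substring searches guarding appends, B runs one left-to-right scan over the message positions (a tiny multi-pattern matcher) collecting every matched keyword into a hit set, then maps the hit set to the signal lists.
import Mathlib
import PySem

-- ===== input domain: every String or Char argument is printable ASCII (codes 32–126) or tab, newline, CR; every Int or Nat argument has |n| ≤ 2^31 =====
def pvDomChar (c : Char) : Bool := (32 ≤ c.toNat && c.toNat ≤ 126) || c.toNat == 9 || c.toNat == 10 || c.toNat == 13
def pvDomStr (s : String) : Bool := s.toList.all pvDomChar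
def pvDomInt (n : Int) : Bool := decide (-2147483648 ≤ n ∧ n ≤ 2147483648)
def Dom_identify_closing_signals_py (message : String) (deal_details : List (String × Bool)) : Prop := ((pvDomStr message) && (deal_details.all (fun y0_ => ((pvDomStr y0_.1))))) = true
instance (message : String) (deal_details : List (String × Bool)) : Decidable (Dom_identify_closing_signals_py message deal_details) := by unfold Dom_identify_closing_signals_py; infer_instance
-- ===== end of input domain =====

-- B replaces A's nine independent substring searches by one left-to-right scan over the
-- message positions collecting every matched keyword into a hit set, then maps the hit
-- set to the signal lists (alternative decomposition; same asymptotic cost).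

-- ===== PORT A =====
-- signals is a dict with the three fixed literal keys "strong"/"moderate"/"weak";
-- it is transliterated as the three list variables, returned in insertion order.
def identify_closing_signals_py (message : String) (deal_details : List (String × Bool)) : List (String × List String) :=
  let strong : List String := []
  let moderate : List String := []
  let weak : List String := []
  let message_lower := PySem.Str.lower message
  let strong := if (["implementation", "start date", "contract", "procurement"].any
      (fun sig => PySem.Str.isIn sig message_lower)) then strong ++ ["asking_about_implementation"] else strong
  let strong := if PySem.Str.isIn "reference" message_lower then strong ++ ["requested_references"] else strong
  let moderate := if (PySem.Str.isIn "pricing" message_lower || PySem.Str.isIn "cost" message_lower)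
      then moderate ++ ["detailed_pricing_questions"] else moderate
  let moderate := if (PySem.Str.isIn "support" message_lower || PySem.Str.isIn "training" message_lower)
      then moderate ++ ["asking_about_support"] else moderate
  let moderate := if PySem.Dict.getD (PySem.Dict.mk deal_details) "trial_active" false
      then moderate ++ ["active_trial_usage"] else moderate
  [("strong", strong), ("moderate", moderate), ("weak", weak)]

-- ===== PORT B =====
def pvKeywords : List String :=
  ["implementation", "start date", "contract", "procurement",
   "reference", "pricing", "cost", "support", "training"]

-- m.startswith(kw, i) with 0 ≤ i ported as a prefix test on the dropped suffix (exact for 0 ≤ i)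
def identify_closing_signals_py_alt (message : String) (deal_details : List (String × Bool)) : List (String × List String) :=
  let m : List Char := PySem.Chars.lower message.toList
  let hits : PySem.Set String :=
    (PySem.List.pyRange 0 (m.length : Int) 1).foldl (fun h i =>
      pvKeywords.foldl (fun h kw =>
        if PySem.Chars.startswith (m.drop i.toNat) kw.toList then PySem.Set.add h kw else h) h)
      PySem.Set.empty
  let strong : List String := []
  let strong := if (["implementation", "start date", "contract", "procurement"].any
      (fun kw => PySem.Set.contains hits kw)) then strong ++ ["asking_about_implementation"] else strong
  let strong := if PySem.Set.contains hits "reference" then strong ++ ["requested_references"] else strong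
  let moderate : List String := []
  let moderate := if (["pricing", "cost"].any (fun kw => PySem.Set.contains hits kw))
      then moderate ++ ["detailed_pricing_questions"] else moderate
  let moderate := if (["support", "training"].any (fun kw => PySem.Set.contains hits kw))
      then moderate ++ ["asking_about_support"] else moderate
  let moderate := if PySem.Dict.getD (PySem.Dict.mk deal_details) "trial_active" false
      then moderate ++ ["active_trial_usage"] else moderate
  [("strong", strong), ("moderate", moderate), ("weak", [])]

-- ===== PRECONDITION & SPEC =====
def Spec_identify_closing_signals_py (message : String) (deal_details : List (String × Bool)) (out : List (String × List String)) : Prop := out = identify_closing_signals_py_alt message deal_details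
instance (message : String) (deal_details : List (String × Bool)) (out : List (String × List String)) : Decidable (Spec_identify_closing_signals_py message deal_details out) := by unfold Spec_identify_closing_signals_py; infer_instance

-- ===== CLAIM (what is proved, stated in full; the proofs are below) =====
def Claim_equal_identify_closing_signals_py : Prop := ∀ (message : String) (deal_details : List (String × Bool)), Dom_identify_closing_signals_py message deal_details → Spec_identify_closing_signals_py message deal_details (identify_closing_signals_py message deal_details)

-- ===== LEMMAS AND PROOFS =====

-- membership after adding one element
theorem pv_contains_add (h : PySem.Set String) (y x : String) :
    PySem.Set.contains (PySem.Set.add h y) x = (PySem.Set.contains h x || x == y) := by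
  unfold PySem.Set.add PySem.Set.contains
  by_cases hm : List.contains h y <;> by_cases hx : x = y <;> simp_all

-- membership after the inner keyword fold
theorem pv_contains_inner (kws : List String) (q : String → Bool)
    (h0 : PySem.Set String) (x : String) :
    PySem.Set.contains (kws.foldl (fun h kw => if q kw then PySem.Set.add h kw else h) h0) x
      = (PySem.Set.contains h0 x || kws.any (fun kw => kw == x && q kw)) := by
  induction kws generalizing h0 with
  | nil => simp
  | cons k ks ih =>
      simp only [List.foldl_cons, List.any_cons, ih]
      by_cases hq : q k
      · rw [if_pos hq, pv_contains_add]
        by_cases hk : x = k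
        · subst hk; simp [hq, Bool.or_comm]
        · have e1 : (x == k) = false := beq_eq_false_iff_ne.mpr hk
          have e2 : (k == x) = false := beq_eq_false_iff_ne.mpr fun e => hk e.symm
          rw [e1, e2]; simp
      · simp [hq]

-- membership after the outer position fold
theorem pv_contains_outer (is : List Int) (kws : List String) (q : Int → String → Bool)
    (h0 : PySem.Set String) (x : String) :
    PySem.Set.contains (is.foldl (fun h i =>
        kws.foldl (fun h kw => if q i kw then PySem.Set.add h kw else h) h) h0) x
      = (PySem.Set.contains h0 x || is.any (fun i => kws.any (fun kw => kw == x && q i kw))) := by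
  induction is generalizing h0 with
  | nil => simp
  | cons i is ih =>
      simp only [List.foldl_cons, List.any_cons]
      rw [ih, pv_contains_inner, Bool.or_assoc]

-- a nonempty pattern occurs as a prefix at some scanned position iff it is a substring
theorem pv_scan_iff_isIn (m : List Char) (kw : List Char) (hkw : kw ≠ []) :
    ((PySem.List.pyRange 0 (m.length : Int) 1).any
        (fun i => PySem.Chars.startswith (m.drop i.toNat) kw))
      = PySem.Chars.isIn kw m := by
  by_cases h : PySem.Chars.isIn kw m
  · simp only [h]
    obtain ⟨j, hj⟩ := (PySem.Chars.exists_prefix_drop_iff_isIn (s := m) (sub := kw)).2 h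
    have hjlt : j < m.length := by
      by_contra hge
      have : m.drop j = [] := List.drop_eq_nil_of_le (by omega)
      rw [this] at hj
      exact hkw (List.prefix_nil.mp hj)
    rw [List.any_eq_true]
    exact ⟨(j : Int), by
      refine ⟨(PySem.List.mem_pyRange_one).2 ⟨by positivity, by exact_mod_cast hjlt⟩, ?_⟩
      simpa [PySem.Chars.startswith_iff] using hj⟩
  · simp only [Bool.not_eq_true] at h
    rw [h, List.any_eq_false]
    intro i hi hsw
    have hp := (PySem.Chars.startswith_iff _ _).1 hsw
    have := (PySem.Chars.exists_prefix_drop_iff_isIn (s := m) (sub := kw)).1 ⟨i.toNat, hp⟩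
    simp [this] at h

-- Set.contains of the hit set = substring test, for each keyword of the table
theorem pv_hits_eq (m : List Char) (kw : String) (hmem : kw ∈ pvKeywords) (hkw : kw.toList ≠ []) :
    PySem.Set.contains
      ((PySem.List.pyRange 0 (m.length : Int) 1).foldl (fun h i =>
        pvKeywords.foldl (fun h kw =>
          if PySem.Chars.startswith (m.drop i.toNat) kw.toList then PySem.Set.add h kw else h) h)
        PySem.Set.empty) kw
      = PySem.Chars.isIn kw.toList m := by
  rw [pv_contains_outer]
  have hempty : PySem.Set.contains (PySem.Set.empty : PySem.Set String) kw = false := rfl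
  rw [hempty, Bool.false_or]
  rw [← pv_scan_iff_isIn m kw.toList hkw]
  congr 1; funext i
  -- the inner any over the keyword table collapses to the single matching keyword
  fin_cases hmem <;> simp [pvKeywords]

-- ===== VERDICT (by name: the statement is the Claim_ definition above) =====
set_option maxHeartbeats 4000000 in
theorem identify_closing_signals_py_spec : Claim_equal_identify_closing_signals_py := by
  intro message deal_details _
  unfold Spec_identify_closing_signals_py identify_closing_signals_py identify_closing_signals_py_alt
  have hIsIn : ∀ kw : String, PySem.Str.isIn kw (PySem.Str.lower message)
      = PySem.Chars.isIn kw.toList (PySem.Chars.lower message.toList) := by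
    intro kw; simp only [PySem.Str.isIn_eq, PySem.Str.toList_lower]
  simp only [hIsIn, List.any_cons, List.any_nil]
  simp only [pv_hits_eq (PySem.Chars.lower message.toList) "implementation" (by decide) (by decide),
      pv_hits_eq (PySem.Chars.lower message.toList) "start date" (by decide) (by decide),
      pv_hits_eq (PySem.Chars.lower message.toList) "contract" (by decide) (by decide),
      pv_hits_eq (PySem.Chars.lower message.toList) "procurement" (by decide) (by decide),
      pv_hits_eq (PySem.Chars.lower message.toList) "reference" (by decide) (by decide),
      pv_hits_eq (PySem.Chars.lower message.toList) "pricing" (by decide) (by decide),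
      pv_hits_eq (PySem.Chars.lower message.toList) "cost" (by decide) (by decide),
      pv_hits_eq (PySem.Chars.lower message.toList) "support" (by decide) (by decide),
      pv_hits_eq (PySem.Chars.lower message.toList) "training" (by decide) (by decide)]
  simp only [Bool.or_false]
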